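-- pv_equiv track=rewrite | github.com/hariharanragothaman/codeforces-solutions | 1352C-Kth-not-divisible-by-N.py | solve
-- ===== SOURCE A (Python) =====
-- def solve(num, k):
--     res, cnt = 0, 0
--     s = 1
--     while cnt != k:
--         if s % num != 0:
--             cnt += 1
--         s += 1
--     return s - 1
-- ===== SOURCE B (Python) =====
-- def solve(num, k):
--     n = abs(num)
--     return k + (k - 1) // (n - 1)
-- ===== Notes on version B (the rewrite author's own statement) =====
-- stated objective: faster
-- what changed: Replaces the O(k) counting loop by the closed form k + (k-1)//(|num|-1) for the k-th positive integer not divisible by num.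
-- outside the precondition, e.g. on solve(3, 0): A returns 0, B returns -1
import Mathlib
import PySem

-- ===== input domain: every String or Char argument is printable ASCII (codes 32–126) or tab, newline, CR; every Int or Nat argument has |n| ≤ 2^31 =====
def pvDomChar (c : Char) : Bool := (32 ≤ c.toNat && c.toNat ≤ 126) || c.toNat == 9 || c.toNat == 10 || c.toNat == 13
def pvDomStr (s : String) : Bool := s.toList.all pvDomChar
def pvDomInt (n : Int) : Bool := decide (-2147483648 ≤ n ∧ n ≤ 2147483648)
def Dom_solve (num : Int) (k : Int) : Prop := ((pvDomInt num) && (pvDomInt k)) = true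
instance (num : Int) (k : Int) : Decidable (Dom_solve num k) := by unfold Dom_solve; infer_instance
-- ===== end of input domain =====

-- B replaces A's O(k) counting loop by the closed form k + (k-1)//(|num|-1) (objective: faster).

-- ===== PORT A =====
-- A's while-loop, step for step; the fuel argument only makes the recursion total
-- (on every input Pre_solve admits the loop exits before the fuel runs out, proved below).
def solveLoop (num k : Int) : Nat → Int → Int → Int
  | 0, _, s => s - 1
  | fuel + 1, cnt, s =>
      if cnt ≠ k then
        if PySem.Int.mod s num ≠ 0 then solveLoop num k fuel (cnt + 1) (s + 1)
        else solveLoop num k fuel cnt (s + 1)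
      else s - 1

def solve (num : Int) (k : Int) : Int := solveLoop num k (2 * k.natAbs + 2) 0 1

-- ===== PORT B =====
def solve_alt (num : Int) (k : Int) : Int :=
  let n : Int := |num|
  k + PySem.Int.floordiv (k - 1) (n - 1)

-- ===== PRECONDITION & SPEC =====
-- Pre_ excludes: num = 0 with k ≥ 1 (A raises ZeroDivisionError), k < 0 and |num| ≤ 1 with
-- k ≥ 1 (A loops forever), and the degenerate request k = 0, where A returns 0 without ever
-- reading num while the closed form has no defined value there.
def Pre_solve (num : Int) (k : Int) : Prop := 1 ≤ k ∧ 2 ≤ |num|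
instance (num : Int) (k : Int) : Decidable (Pre_solve num k) := by unfold Pre_solve; infer_instance
def pvWitness_solve : Int × Int := (3, 5)

def Spec_solve (num : Int) (k : Int) (out : Int) : Prop := out = solve_alt num k
instance (num : Int) (k : Int) (out : Int) : Decidable (Spec_solve num k out) := by unfold Spec_solve; infer_instance

-- ===== CLAIM (what is proved, stated in full; the proofs are below) =====
def Claim_equal_solve : Prop := ∀ (num : Int) (k : Int), Dom_solve num k → Pre_solve num k → Spec_solve num k (solve num k)

-- ===== LEMMAS AND PROOFS =====

-- floordiv a b = q from the bracketing inequalities (positive divisor).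
theorem fd_eq {a b q : Int} (hb : 0 < b) (h1 : q * b ≤ a) (h2 : a < (q + 1) * b) :
    PySem.Int.floordiv a b = q :=
  (PySem.Int.floordiv_eq_iff_of_pos hb).mpr ⟨h1, h2⟩

-- stepping back by one keeps s // n when n does not divide s
theorem fd_pred_of_not_dvd {s n : Int} (hn : 0 < n) (h : PySem.Int.mod s n ≠ 0) :
    PySem.Int.floordiv (s - 1) n = PySem.Int.floordiv s n := by
  have he := PySem.Int.floordiv_mul_add_mod s n
  have h0 := PySem.Int.mod_nonneg s hn
  have h1 := PySem.Int.mod_lt s hn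
  have ht : 1 ≤ PySem.Int.mod s n := by omega
  exact fd_eq hn (by nlinarith) (by nlinarith)

-- stepping back by one drops s // n by one when n divides s
theorem fd_pred_of_dvd {s n : Int} (hn : 0 < n) (h : PySem.Int.mod s n = 0) :
    PySem.Int.floordiv (s - 1) n = PySem.Int.floordiv s n - 1 := by
  have he := PySem.Int.floordiv_mul_add_mod s n
  exact fd_eq hn (by nlinarith) (by nlinarith)

-- Loop invariant: cnt = (s-1) - (s-1)//n counts the non-multiples of n = |num| in [1, s-1];
-- with enough fuel the loop returns N = solve_alt num k.
theorem loop_inv (num k : Int) (hk : 1 ≤ k) (hn : 2 ≤ |num|) :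
    ∀ (fuel : Nat) (s : Int), 1 ≤ s → s ≤ solve_alt num k + 1 →
      (solve_alt num k + 1 - s).toNat ≤ fuel →
      solveLoop num k fuel ((s - 1) - PySem.Int.floordiv (s - 1) |num|) s = solve_alt num k := by
  set n : Int := |num| with hndef
  have hn0 : 0 < n := by omega
  have hn1 : 0 < n - 1 := by omega
  -- division data for q = (k-1) // (n-1)
  set q : Int := PySem.Int.floordiv (k - 1) (n - 1) with hq
  have heq := PySem.Int.floordiv_mul_add_mod (k - 1) (n - 1)
  have hr0 := PySem.Int.mod_nonneg (k - 1) hn1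
  have hr1 := PySem.Int.mod_lt (k - 1) hn1
  set r : Int := PySem.Int.mod (k - 1) (n - 1) with hr
  have hN : solve_alt num k = k + q := by simp [solve_alt, ← hndef, ← hq]
  set N : Int := k + q with hNq
  rw [hN]
  -- N = q*n + (r+1), so N // n = q and N % n = r + 1 ≠ 0
  have hNval : N = q * n + (r + 1) := by rw [hNq]; nlinarith [heq]
  have hq0 : 0 ≤ q := by
    rw [hq]; rw [PySem.Int.le_floordiv_iff_mul_le hn1]; omega
  have hfdN : PySem.Int.floordiv N n = q := fd_eq hn0 (by nlinarith) (by nlinarith)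
  intro fuel
  induction fuel with
  | zero =>
      intro s h1 h2 h3
      have hs : s = N + 1 := by omega
      simp [solveLoop, hs]
  | succ fuel ih =>
      intro s h1 h2 h3
      by_cases hs : s = N + 1
      · -- cnt = N - N//n = k : the loop guard fails and A returns s - 1 = N
        subst hs
        have hcnt : N + 1 - 1 - PySem.Int.floordiv (N + 1 - 1) n = k := by
          have hNN : N + 1 - 1 = N := by ring
          rw [hNN, hfdN]; omega
        rw [solveLoop, if_neg (not_ne_iff.mpr hcnt)]
        ring
      · -- s ≤ N : cnt < k, one more iteration
        have hsN : s ≤ N := by omega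
        have hb := PySem.Int.floordiv_mul_add_mod (s - 1) n
        have hb0 := PySem.Int.mod_nonneg (s - 1) hn0
        have hb1 := PySem.Int.mod_lt (s - 1) hn0
        set mx : Int := PySem.Int.floordiv (s - 1) n with hmx
        have hmxq : mx ≤ q := by
          by_contra h
          have h' : q < mx := lt_of_not_ge h
          nlinarith
        have hcnt : (s - 1) - mx < k := by nlinarith
        rw [solveLoop, if_pos (by omega : (s - 1) - mx ≠ k)]
        by_cases hd : PySem.Int.mod s num = 0
        · rw [if_neg (not_not_intro hd)]
          have hd' : PySem.Int.mod s n = 0 := by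
            rw [hndef, PySem.Int.mod_eq_zero_iff_dvd, abs_dvd,
              ← PySem.Int.mod_eq_zero_iff_dvd]
            exact hd
          have hstep : PySem.Int.floordiv (s + 1 - 1) n = mx + 1 := by
            have h' : s + 1 - 1 = s := by ring
            rw [h']
            have := fd_pred_of_dvd hn0 hd'
            omega
          have hrec := ih (s + 1) (by omega) (by omega) (by omega)
          rw [hstep] at hrec
          have harg : s - 1 - mx = s + 1 - 1 - (mx + 1) := by ring
          rw [harg]
          exact hrec
        · rw [if_pos hd]
          have hd' : PySem.Int.mod s n ≠ 0 := by
            rw [hndef, Ne, PySem.Int.mod_eq_zero_iff_dvd, abs_dvd,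
              ← PySem.Int.mod_eq_zero_iff_dvd]
            exact hd
          have hstep : PySem.Int.floordiv (s + 1 - 1) n = mx := by
            have h' : s + 1 - 1 = s := by ring
            rw [h']
            have := fd_pred_of_not_dvd hn0 hd'
            omega
          have hrec := ih (s + 1) (by omega) (by omega) (by omega)
          rw [hstep] at hrec
          have harg : s - 1 - mx + 1 = s + 1 - 1 - mx := by ring
          rw [harg]
          exact hrec

-- ===== VERDICT (by name: the statement is the Claim_ definition above) =====
theorem solve_spec : Claim_equal_solve := by
  intro num k _ hpre
  obtain ⟨hk, hn⟩ := hpre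
  unfold Spec_solve solve
  set q : Int := PySem.Int.floordiv (k - 1) (|num| - 1) with hq
  have hsa : solve_alt num k = k + q := by simp [solve_alt, ← hq]
  have hq0 : 0 ≤ q := by
    rw [hq, PySem.Int.le_floordiv_iff_mul_le (by omega : (0:Int) < |num| - 1)]; omega
  have hqk : q ≤ k - 1 := by
    have : q < k := by
      rw [hq, PySem.Int.floordiv_lt_iff_lt_mul (by omega : (0:Int) < |num| - 1)]
      nlinarith
    omega
  have hz : PySem.Int.floordiv (0 : Int) |num| = 0 :=
    fd_eq (by omega) (by omega) (by omega)
  have h := loop_inv num k hk hn (2 * k.natAbs + 2) 1 (by omega)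
    (by rw [hsa]; omega) (by rw [hsa]; omega)
  have h0 : (1 : Int) - 1 - PySem.Int.floordiv (1 - 1) |num| = 0 := by
    norm_num [hz]
  rw [h0] at h
  exact h
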